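-- pv_equiv track=rewrite | github.com/isa-nurbek/computer-science | 2. Algorithms/01-Basic Algorithms/03-Naive Pattern Search/03_Implementing Pattern Searching Algorithms in Python/04-Boyer-Moore Algorithm/main.py | boyer_moore_full
-- ===== SOURCE A (Python) =====
-- def bad_char_heuristic(pattern):
--     """
--     Preprocesses the pattern to create the bad character heuristic table.
--     This table stores the last occurrence of each character in the pattern.
--     If a character doesn't exist in the pattern, it's marked as -1.
--     """
--     # Initialize all characters as not found (-1)
--     bad_char = [-1] * 256  # Assuming ASCII character set
--
--     # Fill the table with the last occurrence of each character in pattern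
--     for i in range(len(pattern)):
--         bad_char[ord(pattern[i])] = i  # Store the rightmost position
--
--     return bad_char
--
-- def good_suffix_heuristic(pattern):
--     """
--     Preprocesses the pattern to create the good suffix heuristic table.
--     This table determines how far we can shift the pattern when a mismatch occurs,
--     based on the idea that a matching suffix might appear elsewhere in the pattern.
--     """
--     m = len(pattern)
--     good_suffix = [0] * (m + 1)  # Shift table
--     border_pos = [0] * (m + 1)  # Position of the border (prefix that matches suffix)
--
--     # Case 1: The matching suffix appears somewhere else in the pattern
--     i = m  # Start from end of pattern
--     j = m + 1  # Position beyond the pattern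
--     border_pos[i] = j  # Initialize border position for the suffix
--
--     while i > 0:
--         # If characters don't match, keep moving j to find a border
--         while j <= m and pattern[i - 1] != pattern[j - 1]:
--             # If no good suffix value is set yet, set it
--             if good_suffix[j] == 0:
--                 good_suffix[j] = j - i
--             j = border_pos[j]
--         # Characters match, move both pointers left
--         i -= 1
--         j -= 1
--         border_pos[i] = j  # Record the border position
--
--     # Case 2: Only part of the matching suffix appears at the beginning
--     j = border_pos[0]
--     for i in range(m + 1):
--         # If no good suffix value was set, use the border position
--         if good_suffix[i] == 0:
--             good_suffix[i] = j
--         # If we reach the border, update j to the next border position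
--         if i == j:
--             j = border_pos[j]
--
--     return good_suffix
--
-- def boyer_moore_full(text, pattern):
--     """
--     Implements the Boyer-Moore string search algorithm using both
--     the bad character and good suffix heuristics for maximum efficiency.
--     Returns a list of starting indices where the pattern is found in the text.
--     """
--     n = len(text)
--     m = len(pattern)
--
--     # Handle edge cases
--     if m == 0 or n < m:
--         return []
--
--     # Preprocess the pattern to create heuristic tables
--     bad_char = bad_char_heuristic(pattern)  # Bad character table
--     good_suffix = good_suffix_heuristic(pattern)  # Good suffix table
--     result = []  # To store matching indices
--
--     s = 0  # Current alignment of pattern with text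
--     while s <= n - m:
--         j = m - 1  # Start comparing from the end of pattern
--
--         # Keep moving left while characters match
--         while j >= 0 and pattern[j] == text[s + j]:
--             j -= 1
--
--         if j < 0:
--             # Full match found
--             result.append(s)
--             # Shift by the good suffix value for full match
--             s += good_suffix[0]
--         else:
--             # Mismatch occurred - calculate both shifts
--             # Bad character shift (can be negative, so we use max with 1)
--             bad_char_shift = j - bad_char[ord(text[s + j])]
--             # Good suffix shift for the current position
--             good_suffix_shift = good_suffix[j + 1]
--             # Use the maximum shift value (but at least 1)
--             s += max(1, max(bad_char_shift, good_suffix_shift))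
--
--     return result
-- ===== SOURCE B (Python) =====
-- def boyer_moore_full(text, pattern):
--     """
--     Naive sliding-window search: check every alignment with a direct
--     slice comparison. Same results as the Boyer-Moore version (all
--     occurrences, including overlapping ones), much simpler.
--     """
--     m = len(pattern)
--     if m == 0:
--         return []
--     return [i for i in range(len(text) - m + 1) if text[i:i + m] == pattern]
-- ===== Notes on version B (the rewrite author's own statement) =====
-- stated objective: simpler
-- what changed: Replaces the Boyer-Moore search (bad-character and good-suffix heuristic tables plus a shifting alignment loop) by a direct one-line sliding-window scan that compares a slice at every alignment.
import Mathlib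
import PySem

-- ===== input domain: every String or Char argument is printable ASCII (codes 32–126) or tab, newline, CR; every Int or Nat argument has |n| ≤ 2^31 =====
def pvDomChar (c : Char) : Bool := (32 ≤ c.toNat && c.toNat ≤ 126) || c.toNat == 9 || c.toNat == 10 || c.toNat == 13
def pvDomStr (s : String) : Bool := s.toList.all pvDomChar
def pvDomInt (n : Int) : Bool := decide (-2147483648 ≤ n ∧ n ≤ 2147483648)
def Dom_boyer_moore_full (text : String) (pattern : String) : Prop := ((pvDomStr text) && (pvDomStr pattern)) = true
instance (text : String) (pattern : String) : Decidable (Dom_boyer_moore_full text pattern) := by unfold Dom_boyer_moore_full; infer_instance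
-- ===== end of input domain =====

-- B replaces the Boyer-Moore heuristics by a direct sliding-window slice comparison (simpler; measured faster in CPython, where slicing runs in C).

-- ===== PORT A =====
-- array cells are modelled as a function store Int → Int (pointwise update = Python list assignment)
def pvUpd (st : Int → Int) (k v : Int) : Int → Int := fun x => if x = k then v else st x

-- in-range string indexing pattern[i] / text[i] (all of A's accesses are in range)
def pvPg (l : List Char) (i : Int) : Char := (PySem.List.pyGet? l i).getD default

def pvOrd (c : Char) : Int := (c.toNat : Int)

def bad_char_heuristic (pattern : List Char) : Int → Int :=
  (PySem.List.pyRange 0 (PySem.List.len pattern) 1).foldl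
    (fun bc i => pvUpd bc (pvOrd (pvPg pattern i)) i) (fun _ => -1)

-- inner 'while j <= m and pattern[i-1] != pattern[j-1]' loop of good_suffix_heuristic
def gsInner (p : List Char) (m i : Int) (bp : Int → Int) (fuel : Nat) (j : Int) (gs : Int → Int) :
    Int × (Int → Int) :=
  match fuel with
  | 0 => (j, gs)
  | fuel + 1 =>
    if j ≤ m ∧ pvPg p (i - 1) ≠ pvPg p (j - 1) then
      gsInner p m i bp fuel (bp j) (if gs j = 0 then pvUpd gs j (j - i) else gs)
    else (j, gs)

-- outer 'while i > 0' loop (case 1)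
def gsOuter (p : List Char) (m : Int) (fuel : Nat) (i j : Int) (bp gs : Int → Int) :
    (Int → Int) × (Int → Int) :=
  match fuel with
  | 0 => (bp, gs)
  | fuel + 1 =>
    if 0 < i then
      let r := gsInner p m i bp (m.toNat + 2) j gs
      gsOuter p m fuel (i - 1) (r.1 - 1) (pvUpd bp (i - 1) (r.1 - 1)) r.2
    else (bp, gs)

def good_suffix_heuristic (p : List Char) : Int → Int :=
  let m := PySem.List.len p
  let r := gsOuter p m (m.toNat + 1) m (m + 1) (pvUpd (fun _ => 0) m (m + 1)) (fun _ => 0)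
  let bp := r.1
  ((PySem.List.pyRange 0 (m + 1) 1).foldl
    (fun st i =>
      let gs' := if st.2 i = 0 then pvUpd st.2 i st.1 else st.2
      (if i = st.1 then bp st.1 else st.1, gs'))
    (bp 0, r.2)).2

-- inner 'while j >= 0 and pattern[j] == text[s + j]' comparison loop
def bmCmp (t p : List Char) (s : Int) (fuel : Nat) (j : Int) : Int :=
  match fuel with
  | 0 => j
  | fuel + 1 =>
    if 0 ≤ j ∧ pvPg p j = pvPg t (s + j) then bmCmp t p s fuel (j - 1) else j

-- outer 'while s <= n - m' search loop
def bmSearch (t p : List Char) (n m : Int) (bc gs : Int → Int) (fuel : Nat) (s : Int)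
    (res : List Int) : List Int :=
  match fuel with
  | 0 => res
  | fuel + 1 =>
    if s ≤ n - m then
      let j := bmCmp t p s (m.toNat + 1) (m - 1)
      if j < 0 then
        bmSearch t p n m bc gs fuel (s + gs 0) (res ++ [s])
      else
        bmSearch t p n m bc gs fuel
          (s + max 1 (max (j - bc (pvOrd (pvPg t (s + j)))) (gs (j + 1)))) res
    else res

def boyer_moore_full (text : String) (pattern : String) : List Int :=
  let t := text.toList
  let p := pattern.toList
  let n := PySem.List.len t
  let m := PySem.List.len p
  if m = 0 ∨ n < m then []
  else
    bmSearch t p n m (bad_char_heuristic p) (good_suffix_heuristic p) (n.toNat + 2) 0 []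

-- ===== PORT B =====
def boyer_moore_full_alt (text : String) (pattern : String) : List Int :=
  let m := PySem.Str.len pattern
  if m = 0 then []
  else
    (PySem.List.pyRange 0 (PySem.Str.len text - m + 1) 1).filter
      (fun i => PySem.List.slice text.toList (some i) (some (i + m)) == pattern.toList)

-- ===== PRECONDITION & SPEC =====
def Spec_boyer_moore_full (text : String) (pattern : String) (out : List Int) : Prop := out = boyer_moore_full_alt text pattern
instance (text : String) (pattern : String) (out : List Int) : Decidable (Spec_boyer_moore_full text pattern out) := by unfold Spec_boyer_moore_full; infer_instance

-- ===== CLAIM (what is proved, stated in full; the proofs are below) =====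
def Claim_equal_boyer_moore_full : Prop := ∀ (text : String) (pattern : String), Dom_boyer_moore_full text pattern → Spec_boyer_moore_full text pattern (boyer_moore_full text pattern)

-- ===== LEMMAS AND PROOFS =====

-- character access on the list side
def chL (l : List Char) (x : Nat) : Char := (l[x]?).getD default

theorem pvPg_natCast (l : List Char) (x : Nat) : pvPg l (x : Int) = chL l x := by
  simp [pvPg, chL, PySem.List.pyGet?_natCast]

-- b is a "border position" of the suffix of q starting at r :
-- q[r..r+(m-b)) = q[b..m)  (m = q.length), with r < b ≤ m
abbrev Brd (q : List Char) (r b : Nat) : Prop :=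
  r < b ∧ b ≤ q.length ∧ ∀ t, t < q.length - b → chL q (r + t) = chL q (b + t)

theorem brd_len {q : List Char} {r : Nat} (h : r < q.length) : Brd q r q.length :=
  ⟨h, le_refl _, fun t ht => absurd ht (by omega)⟩

theorem brd_trans {q : List Char} {r c b : Nat} (h1 : Brd q r c) (h2 : Brd q c b) : Brd q r b := by
  obtain ⟨hrc, hcm, hc⟩ := h1
  obtain ⟨hcb, hbm, hb⟩ := h2
  exact ⟨by omega, hbm, fun t ht => by rw [hc t (by omega), hb t ht]⟩

theorem brd_up {q : List Char} {r c b : Nat} (h1 : Brd q r c) (h2 : Brd q r b) (hcb : c < b) :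
    Brd q c b := by
  obtain ⟨hrc, hcm, hc⟩ := h1
  obtain ⟨hrb, hbm, hb⟩ := h2
  refine ⟨hcb, hbm, fun t ht => ?_⟩
  rw [← hc t (by omega), ← hb t ht]

-- bspec q r = the smallest border position of the suffix at r (m+1 if none)
def bspec (q : List Char) (r : Nat) : Nat :=
  Nat.find (p := fun b => Brd q r b ∨ b = q.length + 1) ⟨q.length + 1, Or.inr rfl⟩

theorem bspec_le {q : List Char} {r b : Nat} (h : Brd q r b) : bspec q r ≤ b :=
  Nat.find_min' _ (Or.inl h)

theorem bspec_spec (q : List Char) (r : Nat) :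
    Brd q r (bspec q r) ∨ bspec q r = q.length + 1 :=
  Nat.find_spec (p := fun b => Brd q r b ∨ b = q.length + 1) _

theorem bspec_gt {q : List Char} {r : Nat} (hr : r ≤ q.length) : r < bspec q r := by
  rcases bspec_spec q r with h | h
  · exact h.1
  · omega

theorem bspec_len (q : List Char) : bspec q q.length = q.length + 1 := by
  rcases bspec_spec q q.length with h | h
  · exact absurd h.2.1 (by omega)
  · exact h

-- row r "configures" x : the suffix q[x..m) reappears at r with a differing preceding char
abbrev cfg (q : List Char) (r x : Nat) : Prop :=
  1 ≤ r ∧ Brd q r x ∧ chL q (r - 1) ≠ chL q (x - 1)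

abbrev hasCfg (q : List Char) (v x : Nat) : Prop := ∃ r, r < x ∧ v ≤ r ∧ cfg q r x

def rmax (q : List Char) (v x : Nat) : Nat := Nat.findGreatest (fun r => v ≤ r ∧ cfg q r x) x

-- the good-suffix value accumulated by case 1, considering only rows ≥ v
def gsModel (q : List Char) (v x : Nat) : Int :=
  if hasCfg q v x then (x : Int) - (rmax q v x : Int) else 0

theorem gsModel_top (q : List Char) (x : Nat) (hx : x ≤ q.length) :
    gsModel q (q.length + 1) x = 0 := by
  rw [gsModel, if_neg]
  rintro ⟨r, hrx, hvr, -⟩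
  omega

theorem rmax_spec {q : List Char} {v x : Nat} (h : hasCfg q v x) :
    v ≤ rmax q v x ∧ cfg q (rmax q v x) x := by
  obtain ⟨r, hrx, hvr, hcfg⟩ := h
  unfold rmax
  exact Nat.findGreatest_spec (P := fun r => v ≤ r ∧ cfg q r x) (m := r) (by omega) ⟨hvr, hcfg⟩

theorem rmax_is_greatest {q : List Char} {v x r : Nat} (h : rmax q v x < r) (hrx : r ≤ x) :
    ¬ (v ≤ r ∧ cfg q r x) :=
  Nat.findGreatest_is_greatest (P := fun r => v ≤ r ∧ cfg q r x) h hrx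

theorem rmax_lt {q : List Char} {v x : Nat} (h : hasCfg q v x) : rmax q v x < x :=
  (rmax_spec h).2.2.1.1

theorem gsModel_pos {q : List Char} {v x : Nat} (h : hasCfg q v x) :
    1 ≤ gsModel q v x := by
  have := rmax_lt h
  rw [gsModel, if_pos h]; omega

theorem gsModel_eq_zero_iff {q : List Char} {v x : Nat} :
    gsModel q v x = 0 ↔ ¬ hasCfg q v x := by
  by_cases h : hasCfg q v x
  · have := gsModel_pos h
    constructor
    · intro h0; omega
    · intro hn; exact absurd h hn
  · rw [gsModel, if_neg h]
    exact ⟨fun _ => h, fun _ => rfl⟩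

-- passing from rows ≥ v+1 to rows ≥ v changes nothing unless row v itself configures x freshly
theorem gsModel_succ_eq {q : List Char} {v x : Nat}
    (h : ¬ cfg q v x ∨ ∃ r, v + 1 ≤ r ∧ r < x ∧ cfg q r x) :
    gsModel q v x = gsModel q (v + 1) x := by
  have hiff : hasCfg q v x ↔ hasCfg q (v + 1) x := by
    constructor
    · rintro ⟨r, hrx, hvr, hc⟩
      rcases Nat.lt_or_ge v r with hv | hv
      · exact ⟨r, hrx, by omega, hc⟩
      · have hrv : r = v := by omega
        subst hrv
        rcases h with h | ⟨r', h1, h2, h3⟩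
        · exact absurd hc h
        · exact ⟨r', h2, h1, h3⟩
    · rintro ⟨r, hrx, hvr, hc⟩
      exact ⟨r, hrx, by omega, hc⟩
  by_cases hh : hasCfg q v x
  · have hh' : hasCfg q (v + 1) x := hiff.mp hh
    rw [gsModel, gsModel, if_pos hh, if_pos hh']
    have heq : rmax q v x = rmax q (v + 1) x := by
      obtain ⟨r, hrx, hvr, hc⟩ := id hh'
      have h1 : r ≤ rmax q v x := Nat.le_findGreatest (by omega) ⟨by omega, hc⟩
      have h2 : r ≤ rmax q (v + 1) x := Nat.le_findGreatest (by omega) ⟨hvr, hc⟩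
      have hs1 := rmax_spec hh
      have hs2 := rmax_spec hh'
      have hle1 : rmax q v x ≤ x := Nat.findGreatest_le x
      have hle2 : rmax q (v + 1) x ≤ x := Nat.findGreatest_le x
      rcases Nat.lt_trichotomy (rmax q v x) (rmax q (v + 1) x) with hlt | heq | hgt
      · exact absurd ⟨by omega, hs2.2⟩ (rmax_is_greatest (v := v) hlt hle2)
      · exact heq
      · exact absurd ⟨by omega, hs1.2⟩ (rmax_is_greatest (v := v + 1) hgt hle1)
    rw [heq]
  · rw [gsModel, gsModel, if_neg hh, if_neg (fun hc => hh (hiff.mpr hc))]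

theorem gsModel_eq_of_cfg {q : List Char} {v x : Nat} (hc : cfg q v x)
    (hnone : ¬ hasCfg q (v + 1) x) : gsModel q v x = (x : Int) - (v : Int) := by
  have hvx : v < x := hc.2.1.1
  have hh : hasCfg q v x := ⟨v, hvx, le_refl _, hc⟩
  rw [gsModel, if_pos hh]
  have hle : v ≤ rmax q v x := Nat.le_findGreatest (by omega) ⟨le_refl _, hc⟩
  have hsp := rmax_spec hh
  have : rmax q v x ≤ v := by
    by_contra hgt
    exact hnone ⟨rmax q v x, rmax_lt hh, by omega, hsp.2⟩
  have : rmax q v x = v := by omega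
  rw [this]

-- stop position of the case-1 inner walk started at chain position c of row r
def jstop (q : List Char) (r c : Nat) : Nat :=
  Nat.find (p := fun b => (Brd q r b ∧ c ≤ b ∧ chL q (b - 1) = chL q (r - 1)) ∨ b = q.length + 1)
    ⟨q.length + 1, Or.inr rfl⟩

theorem jstop_spec (q : List Char) (r c : Nat) :
    (Brd q r (jstop q r c) ∧ c ≤ jstop q r c ∧ chL q (jstop q r c - 1) = chL q (r - 1)) ∨
      jstop q r c = q.length + 1 :=
  Nat.find_spec (p := fun b => (Brd q r b ∧ c ≤ b ∧ chL q (b - 1) = chL q (r - 1)) ∨ b = q.length + 1) _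

theorem jstop_le_top (q : List Char) (r c : Nat) : jstop q r c ≤ q.length + 1 :=
  Nat.find_min' _ (Or.inr rfl)

-- the case-1 inner while loop : walks the border chain, recording shifts at mismatching stops
theorem gsInner_spec (q : List Char) (r : Nat) (bp : Int → Int) :
    ∀ (fuel c : Nat) (gs : Int → Int), 1 ≤ r → r ≤ q.length →
    (Brd q r c ∨ c = q.length + 1) →
    (∀ b : Nat, Brd q r b → bp (b : Int) = (bspec q b : Int)) →
    (∀ x : Nat, x ≤ q.length →
      gs (x : Int) = if x < c then gsModel q r x else gsModel q (r + 1) x) →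
    q.length + 2 ≤ fuel + c →
    (gsInner q (q.length : Int) (r : Int) bp fuel (c : Int) gs).1 = (jstop q r c : Int) ∧
    (∀ x : Nat, x ≤ q.length →
      (gsInner q (q.length : Int) (r : Int) bp fuel (c : Int) gs).2 (x : Int) =
        if x < jstop q r c then gsModel q r x else gsModel q (r + 1) x) := by
  intro fuel
  induction fuel with
  | zero =>
    intro c gs hr hrm hc hbp hgs hfuel
    exfalso
    rcases hc with hbrd | hcl
    · have := hbrd.2.1; omega
    · omega
  | succ fuel ih =>
    intro c gs hr hrm hc hbp hgs hfuel
    rcases hc with hbrd | hcl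
    · -- c is a real border position (c ≤ q.length)
      by_cases hch : chL q (r - 1) = chL q (c - 1)
      · -- matching preceding character : the walk stops here
        have hstop : jstop q r c = c := by
          have hle : jstop q r c ≤ c := Nat.find_min' _ (Or.inl ⟨hbrd, le_refl _, hch.symm⟩)
          rcases jstop_spec q r c with hsp | hsp
          · omega
          · have := hbrd.2.1; omega
        rw [gsInner, if_neg (by
          rintro ⟨-, hne⟩
          apply hne
          rw [show ((r : Int) - 1) = ((r - 1 : Nat) : Int) by omega,
            show ((c : Int) - 1) = ((c - 1 : Nat) : Int) by
              have := hbrd.1; omega,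
            pvPg_natCast, pvPg_natCast]
          exact hch)]
        rw [hstop]
        exact ⟨rfl, hgs⟩
      · -- mismatch : record the shift (if unset) and follow the border chain
        have hclen : c ≤ q.length := hbrd.2.1
        have hrc : r < c := hbrd.1
        have hcfg : cfg q r c := ⟨hr, hbrd, hch⟩
        have hcgt := bspec_gt (q := q) (r := c) hclen
        have hcond : ((c : Int) ≤ (q.length : Int) ∧
            pvPg q ((r : Int) - 1) ≠ pvPg q ((c : Int) - 1)) := by
          refine ⟨by omega, ?_⟩
          rw [show ((r : Int) - 1) = ((r - 1 : Nat) : Int) by omega,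
            show ((c : Int) - 1) = ((c - 1 : Nat) : Int) by omega,
            pvPg_natCast, pvPg_natCast]
          exact hch
        rw [gsInner, if_pos hcond, hbp c hbrd]
        set gs' := if gs (c : Int) = 0 then pvUpd gs (c : Int) ((c : Int) - (r : Int)) else gs
          with hgs'def
        have hc' : Brd q r (bspec q c) ∨ bspec q c = q.length + 1 := by
          rcases bspec_spec q c with hsp | hsp
          · exact Or.inl (brd_trans hbrd hsp)
          · exact Or.inr hsp
        have hgsnew : ∀ x : Nat, x ≤ q.length →
            gs' (x : Int) = if x < bspec q c then gsModel q r x else gsModel q (r + 1) x := by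
          intro x hx
          by_cases hxc : x = c
          · subst hxc
            rw [if_pos (by omega)]
            have hold : gs (x : Int) = gsModel q (r + 1) x := by
              rw [hgs x hx, if_neg (by omega)]
            by_cases h0 : gs (x : Int) = 0
            · rw [hgs'def, if_pos h0, pvUpd, if_pos rfl]
              have hnone : ¬ hasCfg q (r + 1) x :=
                gsModel_eq_zero_iff.mp (hold ▸ h0)
              rw [gsModel_eq_of_cfg hcfg hnone]
            · rw [hgs'def, if_neg h0]
              have hhas : hasCfg q (r + 1) x := by
                by_contra hn
                exact h0 (hold.trans (gsModel_eq_zero_iff.mpr hn))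
              rw [hold]
              refine (gsModel_succ_eq (Or.inr ?_)).symm
              obtain ⟨r', h1, h2, h3⟩ := hhas
              exact ⟨r', h2, h1, h3⟩
          · have hne : ((x : Int)) ≠ (c : Int) := by
              intro h
              exact hxc (by exact_mod_cast h)
            have hkeep : gs' (x : Int) = gs (x : Int) := by
              rw [hgs'def]
              split
              · rw [pvUpd, if_neg hne]
              · rfl
            rw [hkeep, hgs x hx]
            rcases Nat.lt_or_ge x c with hxlt | hxge
            · rw [if_pos hxlt, if_pos (by omega)]
            · rw [if_neg (by omega)]
              rcases Nat.lt_or_ge x (bspec q c) with hxb | hxb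
              · rw [if_pos hxb]
                refine (gsModel_succ_eq (Or.inl ?_)).symm
                rintro ⟨-, hbx, -⟩
                have : Brd q c x := brd_up hbrd hbx (by omega)
                have := bspec_le this
                omega
              · rw [if_neg (by omega)]
        have hjeq : jstop q r c = jstop q r (bspec q c) := by
          have h1 : jstop q r c ≤ jstop q r (bspec q c) := by
            apply Nat.find_min'
            rcases jstop_spec q r (bspec q c) with hsp | hsp
            · exact Or.inl ⟨hsp.1, by omega, hsp.2.2⟩
            · exact Or.inr hsp
          have h2 : jstop q r (bspec q c) ≤ jstop q r c := by
            apply Nat.find_min'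
            rcases jstop_spec q r c with hsp | hsp
            · obtain ⟨hb, hcb, hmatch⟩ := hsp
              have hbc : c < jstop q r c := by
                rcases Nat.eq_or_lt_of_le hcb with h | h
                · exfalso; apply hch; rw [← h] at hmatch; exact hmatch.symm
                · exact h
              exact Or.inl ⟨hb, bspec_le (brd_up hbrd hb hbc), hmatch⟩
            · exact Or.inr hsp
          omega
        have hfuel' : q.length + 2 ≤ fuel + bspec q c := by omega
        obtain ⟨ih1, ih2⟩ := ih (bspec q c) gs' hr hrm hc' hbp hgsnew hfuel'
        rw [hjeq]
        exact ⟨ih1, ih2⟩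
    · -- c = q.length + 1 : the chain is exhausted
      have hstop : jstop q r c = c := by
        have hle : jstop q r c ≤ c := by
          rw [hcl]; exact jstop_le_top q r _
        rcases jstop_spec q r c with hsp | hsp
        · omega
        · omega
      rw [gsInner, if_neg (by rintro ⟨hle, -⟩; omega)]
      rw [hstop]
      exact ⟨rfl, hgs⟩

-- computing the next border position : bspec (r-1) from the walk of row r
theorem bspec_pred {q : List Char} {r : Nat} (hr : 1 ≤ r) (hrm : r ≤ q.length) :
    1 ≤ jstop q r (bspec q r) ∧ bspec q (r - 1) = jstop q r (bspec q r) - 1 := by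
  set j := jstop q r (bspec q r) with hjdef
  have hjpos : r < j := by
    rcases jstop_spec q r (bspec q r) with hsp | hsp
    · have := hsp.1.1; omega
    · omega
  refine ⟨by omega, ?_⟩
  have hjtop : j ≤ q.length + 1 := jstop_le_top q r _
  -- the target value satisfies the border predicate for r - 1
  have hP : Brd q (r - 1) (j - 1) ∨ j - 1 = q.length + 1 := by
    rcases jstop_spec q r (bspec q r) with ⟨hb, -, hmatch⟩ | hsp
    · left
      obtain ⟨hrj, hjm, hall⟩ := hb
      refine ⟨by omega, by omega, fun t ht => ?_⟩
      match t with
      | 0 => simpa using hmatch.symm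
      | t + 1 =>
        have := hall t (by omega)
        rw [show r - 1 + (t + 1) = r + t by omega, show j - 1 + (t + 1) = j + t by omega]
        exact this
    · left
      rw [hjdef, hsp]
      exact brd_len (by omega)
  -- nothing below it satisfies the predicate
  have hmin : ∀ b, b < j - 1 → ¬ Brd q (r - 1) b := by
    intro b hb hbrd
    obtain ⟨hrb, hbm, hall⟩ := hbrd
    have hblen : b < q.length := by omega
    have hbrd' : Brd q r (b + 1) := by
      refine ⟨by omega, by omega, fun t ht => ?_⟩
      have := hall (t + 1) (by omega)
      rw [show r - 1 + (t + 1) = r + t by omega, show b + (t + 1) = b + 1 + t by omega] at this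
      exact this
    have hch : chL q (b + 1 - 1) = chL q (r - 1) := by
      have := hall 0 (by omega)
      simpa using this.symm
    have : j ≤ b + 1 :=
      Nat.find_min' _ (Or.inl ⟨hbrd', bspec_le hbrd', hch⟩)
    omega
  rw [bspec]
  rw [Nat.find_eq_iff]
  constructor
  · rcases hP with h | h
    · exact Or.inl h
    · exact Or.inr h
  · intro b hb
    rintro (hbrd | hbl)
    · exact hmin b hb hbrd
    · omega

-- after the stop position, row r contributes nothing new
theorem gsModel_after_stop {q : List Char} {r x : Nat} (hr : 1 ≤ r) (hrm : r ≤ q.length)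
    (hx : x ≤ q.length) (hge : jstop q r (bspec q r) ≤ x) :
    gsModel q r x = gsModel q (r + 1) x := by
  set j := jstop q r (bspec q r) with hjdef
  apply gsModel_succ_eq
  by_cases hcfg : cfg q r x
  · right
    have hjlen : j ≤ q.length := by omega
    rcases jstop_spec q r (bspec q r) with ⟨hb, -, hmatch⟩ | hsp
    · rcases Nat.eq_or_lt_of_le hge with heq | hlt
      · exfalso
        apply hcfg.2.2
        rw [← heq, hjdef]
        exact hmatch.symm
      · have hrj : r < j := hb.1
        exact ⟨j, by omega, by omega, ⟨by omega, brd_up hb hcfg.2.1 hlt,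
          by rw [← hjdef] at hmatch; rw [hmatch]; exact hcfg.2.2⟩⟩
    · omega
  · exact Or.inl hcfg

-- the case-1 outer loop
theorem gsOuter_spec (q : List Char) :
    ∀ (fuel i : Nat) (bp gs : Int → Int), i ≤ q.length → i ≤ fuel →
    (∀ x : Nat, i ≤ x → x ≤ q.length → bp (x : Int) = (bspec q x : Int)) →
    (∀ x : Nat, x ≤ q.length → gs (x : Int) = gsModel q (i + 1) x) →
    (∀ x : Nat, x ≤ q.length →
      (gsOuter q (q.length : Int) fuel (i : Int) (bspec q i : Int) bp gs).1 (x : Int) =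
        (bspec q x : Int) ∧
      (gsOuter q (q.length : Int) fuel (i : Int) (bspec q i : Int) bp gs).2 (x : Int) =
        gsModel q 1 x) := by
  intro fuel i
  induction i generalizing fuel with
  | zero =>
    intro bp gs _ _ hbp hgs x hx
    match fuel with
    | 0 => exact ⟨hbp x (by omega) hx, hgs x hx⟩
    | f + 1 =>
      rw [gsOuter, if_neg (by norm_num)]
      exact ⟨hbp x (by omega) hx, hgs x hx⟩
  | succ i ih =>
    intro bp gs hi hfuel hbp hgs
    obtain ⟨f, rfl⟩ : ∃ f, fuel = f + 1 := ⟨fuel - 1, by omega⟩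
    rw [gsOuter, if_pos (by positivity)]
    dsimp only
    have hinner := gsInner_spec q (i + 1) bp ((q.length : Int).toNat + 2) (bspec q (i + 1)) gs
      (by omega) hi
      (bspec_spec q (i + 1))
      (fun b hb => hbp b (by omega) hb.2.1)
      (by
        intro x hx
        rw [hgs x hx]
        split
        · next hlt =>
          refine (gsModel_succ_eq (Or.inl ?_)).symm
          rintro ⟨-, hbx, -⟩
          have := bspec_le hbx
          omega
        · rfl)
      (by
        have h1 : ((q.length : Int)).toNat = q.length := Int.toNat_natCast q.length
        omega)
    obtain ⟨hin1, hin2⟩ := hinner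
    have hpred := bspec_pred (q := q) (r := i + 1) (by omega) hi
    have hj : (gsInner q (q.length : Int) ((i + 1 : Nat) : Int) bp
        ((q.length : Int).toNat + 2) ((bspec q (i + 1) : Nat) : Int) gs).1 - 1 =
        ((bspec q i : Nat) : Int) := by
      rw [hin1]
      have h1 := hpred.1
      have h2 := hpred.2
      simp only [Nat.add_sub_cancel] at h2
      omega
    have hcast1 : ((i + 1 : Nat) : Int) - 1 = ((i : Nat) : Int) := by push_cast; ring
    rw [hcast1, hj]
    apply ih f (pvUpd bp ((i : Nat) : Int) ((bspec q i : Nat) : Int))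
      _ (by omega) (by omega)
    · intro x hix hx
      rw [pvUpd]
      split
      · next he =>
        have hxi : x = i := by exact_mod_cast he
        rw [hxi]
      · next he =>
        have hne : x ≠ i := fun hxe => he (by rw [hxe])
        exact hbp x (by omega) hx
    · intro x hx
      rw [hin2 x hx]
      split
      · rfl
      · next hge =>
        exact (gsModel_after_stop (by omega) hi hx (by omega)).symm

-- jnext q i = the smallest border position of the whole pattern that is ≥ i (m+1 if none)
def jnext (q : List Char) (i : Nat) : Nat :=
  Nat.find (p := fun b => (Brd q 0 b ∧ i ≤ b) ∨ b = q.length + 1) ⟨q.length + 1, Or.inr rfl⟩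

theorem jnext_spec (q : List Char) (i : Nat) :
    (Brd q 0 (jnext q i) ∧ i ≤ jnext q i) ∨ jnext q i = q.length + 1 :=
  Nat.find_spec (p := fun b => (Brd q 0 b ∧ i ≤ b) ∨ b = q.length + 1) _

theorem jnext_min' {q : List Char} {i b : Nat} (h : Brd q 0 b) (hib : i ≤ b) : jnext q i ≤ b :=
  Nat.find_min' _ (Or.inl ⟨h, hib⟩)

theorem jnext_le_len {q : List Char} {i : Nat} (hm : 1 ≤ q.length) (hi : i ≤ q.length) :
    jnext q i ≤ q.length :=
  jnext_min' (brd_len (by omega)) hi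

theorem jnext_pos {q : List Char} {i : Nat} : 1 ≤ jnext q i := by
  rcases jnext_spec q i with h | h
  · have := h.1.1; omega
  · omega

-- the final good-suffix table value
def gsF (q : List Char) (x : Nat) : Int :=
  if gsModel q 1 x = 0 then (jnext q x : Int) else gsModel q 1 x

theorem jnext_step {q : List Char} {a : Nat} (ha : a ≤ q.length) (hBrd : Brd q 0 a) :
    jnext q (a + 1) = bspec q a := by
  have h1 : jnext q (a + 1) ≤ bspec q a := by
    rcases bspec_spec q a with hsp | hsp
    · exact jnext_min' (brd_trans hBrd hsp) (by have := hsp.1; omega)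
    · rw [hsp]
      exact Nat.find_min' _ (Or.inr rfl)
  have h2 : bspec q a ≤ jnext q (a + 1) := by
    rcases jnext_spec q (a + 1) with hsp | hsp
    · exact bspec_le (brd_up hBrd hsp.1 (by omega))
    · rw [hsp]
      exact Nat.find_min' _ (Or.inr rfl)
  omega

theorem jnext_succ_eq {q : List Char} {a : Nat} (ha : a ≤ q.length) (hne : a ≠ jnext q a) :
    jnext q (a + 1) = jnext q a := by
  have hgt : a < jnext q a := by
    rcases jnext_spec q a with hsp | hsp
    · rcases Nat.eq_or_lt_of_le hsp.2 with h | h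
      · exact absurd h hne
      · exact h
    · omega
  have h1 : jnext q (a + 1) ≤ jnext q a := by
    rcases jnext_spec q a with hsp | hsp
    · exact Nat.find_min' _ (Or.inl ⟨hsp.1, by omega⟩)
    · rw [hsp]; exact Nat.find_min' _ (Or.inr rfl)
  have h2 : jnext q a ≤ jnext q (a + 1) := by
    rcases jnext_spec q (a + 1) with hsp | hsp
    · exact Nat.find_min' _ (Or.inl ⟨hsp.1, by omega⟩)
    · rw [hsp]; exact Nat.find_min' _ (Or.inr rfl)
  omega

theorem bspec_zero_eq_jnext (q : List Char) : bspec q 0 = jnext q 0 := by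
  have h1 : bspec q 0 ≤ jnext q 0 := by
    rcases jnext_spec q 0 with hsp | hsp
    · exact bspec_le hsp.1
    · rw [hsp]; exact Nat.find_min' _ (Or.inr rfl)
  have h2 : jnext q 0 ≤ bspec q 0 := by
    rcases bspec_spec q 0 with hsp | hsp
    · exact jnext_min' hsp (by omega)
    · rw [hsp]; exact Nat.find_min' _ (Or.inr rfl)
  omega

-- the case-2 fill loop
theorem phase2_fold (q : List Char) (bp : Int → Int)
    (hbp : ∀ x : Nat, x ≤ q.length → bp (x : Int) = (bspec q x : Int)) :
    ∀ (k a : Nat) (j : Int) (gs : Int → Int), a + k = q.length + 1 →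
    j = (jnext q a : Int) →
    (∀ x : Nat, x ≤ q.length → gs (x : Int) = if x < a then gsF q x else gsModel q 1 x) →
    (∀ x : Nat, x ≤ q.length →
      (((List.range' a k).map (fun (u : Nat) => (u : Int))).foldl
        (fun (st : Int × (Int → Int)) (i : Int) =>
          (if i = st.1 then bp st.1 else st.1,
           if st.2 i = 0 then pvUpd st.2 i st.1 else st.2)) (j, gs)).2 (x : Int) = gsF q x) := by
  intro k
  induction k with
  | zero =>
    intro a j gs hak hj hgs x hx
    simp only [List.range'_zero, List.map_nil, List.foldl_nil]
    rw [hgs x hx, if_pos (by omega)]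
  | succ k ih =>
    intro a j gs hak hj hgs x hx
    have ha : a ≤ q.length := by omega
    rw [List.range'_succ, List.map_cons, List.foldl_cons]
    have hgs' : ∀ y : Nat, y ≤ q.length →
        (if gs (a : Int) = 0 then pvUpd gs (a : Int) j else gs) (y : Int) =
          if y < a + 1 then gsF q y else gsModel q 1 y := by
      intro y hy
      have hgsa : gs (a : Int) = gsModel q 1 a := by
        rw [hgs a ha, if_neg (by omega)]
      by_cases hya : y = a
      · subst hya
        split
        · next h0 =>
          rw [pvUpd, if_pos rfl, if_pos (by omega), gsF, if_pos (hgsa ▸ h0), hj]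
        · next h0 =>
          rw [hgs y hy, if_neg (by omega), if_pos (by omega), gsF,
            if_neg (fun hz => h0 (hgsa.trans hz))]
      · have hne : ((y : Int)) ≠ ((a : Int)) := fun h => hya (by exact_mod_cast h)
        have hkeep : (if gs (a : Int) = 0 then pvUpd gs (a : Int) j else gs) (y : Int) =
            gs (y : Int) := by
          split
          · rw [pvUpd, if_neg hne]
          · rfl
        rw [hkeep, hgs y hy]
        rcases Nat.lt_or_ge y a with h | h
        · rw [if_pos h, if_pos (by omega)]
        · rw [if_neg (by omega), if_neg (by omega)]
    have hj' : (if (a : Int) = j then bp j else j) = (jnext q (a + 1) : Int) := by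
      by_cases haj : a = jnext q a
      · have hBrd : Brd q 0 a := by
          rcases jnext_spec q a with hsp | hsp
          · rw [haj]; exact hsp.1
          · omega
        rw [if_pos (by rw [hj, ← haj]), hj, ← haj, hbp a ha, jnext_step ha hBrd]
      · rw [if_neg (by
          rw [hj]
          intro h
          exact haj (by exact_mod_cast h)), hj, jnext_succ_eq ha haj]
    rw [hj']
    exact ih (a + 1) _ _ (by omega) rfl hgs' x hx

-- the full good_suffix_heuristic computes gsF on 0..m
theorem gs_table (q : List Char) (hm : 1 ≤ q.length) :
    ∀ x : Nat, x ≤ q.length → good_suffix_heuristic q (x : Int) = gsF q x := by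
  intro x hx
  rw [good_suffix_heuristic]
  dsimp only
  rw [PySem.List.len_eq, Int.toNat_natCast]
  rw [show ((q.length : Int) + 1) = ((q.length + 1 : Nat) : Int) by push_cast; ring]
  have hbp0 : ∀ y : Nat, q.length ≤ y → y ≤ q.length →
      (pvUpd (fun _ => 0) ((q.length : Nat) : Int) (((q.length + 1 : Nat)) : Int)) (y : Int) =
        (bspec q y : Int) := by
    intro y h1 h2
    have hy : y = q.length := by omega
    subst hy
    rw [pvUpd, if_pos rfl, bspec_len]
  have hgs0 : ∀ y : Nat, y ≤ q.length →
      (fun (_ : Int) => (0 : Int)) ((y : Nat) : Int) = gsModel q (q.length + 1) y := by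
    intro y hy
    exact (gsModel_top q y hy).symm
  have hout := gsOuter_spec q (q.length + 1) q.length
    (pvUpd (fun _ => 0) ((q.length : Nat) : Int) (((q.length + 1 : Nat)) : Int))
    (fun _ => 0) (le_refl _) (by omega) hbp0 hgs0
  rw [bspec_len q] at hout
  rw [PySem.List.pyRange_zero_natCast, List.range_eq_range']
  exact phase2_fold q _ (fun y hy => (hout y hy).1) (q.length + 1) 0 _ _ (by omega)
    (by
      have h00 := (hout 0 (by omega)).1
      rw [Nat.cast_zero] at h00
      rw [h00, bspec_zero_eq_jnext])
    (by
      intro y hy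
      rw [(hout y hy).2, if_neg (by omega)])
    x hx

theorem gsF_pos {q : List Char} {x : Nat} (hm : 1 ≤ q.length) (hx : x ≤ q.length) :
    1 ≤ gsF q x := by
  rw [gsF]
  split
  · have := jnext_pos (q := q) (i := x); omega
  · next h =>
    have : hasCfg q 1 x := by
      by_contra hn
      exact h (gsModel_eq_zero_iff.mpr hn)
    exact gsModel_pos this

theorem gsF_le_len {q : List Char} {x : Nat} (hm : 1 ≤ q.length) (hx : x ≤ q.length) :
    gsF q x ≤ (q.length : Int) := by
  rw [gsF]
  split
  · have := jnext_le_len (q := q) hm hx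
    omega
  · next h =>
    have hhas : hasCfg q 1 x := by
      by_contra hn
      exact h (gsModel_eq_zero_iff.mpr hn)
    rw [gsModel, if_pos hhas]
    omega

-- soundness of the good-suffix shift : every smaller shift is incompatible
theorem gsF_safe {q : List Char} {x k : Nat} (hx : x ≤ q.length)
    (hk : 1 ≤ k) (hlt : (k : Int) < gsF q x) :
    ¬ ((k < x ∧ cfg q (x - k) x) ∨ (x ≤ k ∧ Brd q 0 k)) := by
  rw [gsF] at hlt
  rintro (⟨hkx, hcfg⟩ | ⟨hxk, hbrd⟩)
  · have hhas : hasCfg q 1 x := ⟨x - k, by omega, hcfg.1, hcfg⟩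
    by_cases h0 : gsModel q 1 x = 0
    · exact (gsModel_eq_zero_iff.mp h0) hhas
    · rw [if_neg h0, gsModel, if_pos hhas] at hlt
      have hgt : rmax q 1 x < x - k := by omega
      exact rmax_is_greatest hgt (by omega) ⟨hcfg.1, hcfg⟩
  · by_cases h0 : gsModel q 1 x = 0
    · rw [if_pos h0] at hlt
      have : jnext q x ≤ k := jnext_min' hbrd hxk
      omega
    · rw [if_neg h0, gsModel, if_pos (by
        by_contra hn
        exact h0 (gsModel_eq_zero_iff.mpr hn))] at hlt
      have := Nat.findGreatest_le (P := fun r => 1 ≤ r ∧ cfg q r x) x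
      have hrm : rmax q 1 x ≤ x := this
      omega

-- bad character table : stores only indices ≥ the index of every occurrence of the char
theorem bc_fold (q : List Char) (k : Nat) (hk : k ≤ q.length) :
    (∀ z : Int,
      -1 ≤ (((List.range k).map (fun (i : Nat) => (i : Int))).foldl
        (fun bc (i : Int) => pvUpd bc (pvOrd (pvPg q i)) i) (fun _ => -1)) z) ∧
    (∀ x : Nat, x < k →
      (x : Int) ≤ (((List.range k).map (fun (i : Nat) => (i : Int))).foldl
        (fun bc (i : Int) => pvUpd bc (pvOrd (pvPg q i)) i) (fun _ => -1)) (pvOrd (chL q x))) := by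
  induction k with
  | zero =>
    refine ⟨fun z => ?_, fun x hx => absurd hx (by omega)⟩
    simp [List.range_zero]
  | succ k ih =>
    obtain ⟨ih1, ih2⟩ := ih (by omega)
    rw [List.range_succ, List.map_append, List.foldl_append, List.map_cons, List.map_nil, List.foldl_cons, List.foldl_nil]
    refine ⟨fun z => ?_, fun x hx => ?_⟩
    · rw [pvUpd]
      split
      · have : (0 : Int) ≤ (k : Int) := by positivity
        omega
      · exact ih1 z
    · rcases Nat.lt_succ_iff_lt_or_eq.mp hx with hlt | heq
      · rw [pvUpd]
        split
        · next he =>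
          have hx2 := ih2 x hlt
          omega
        · exact ih2 x hlt
      · subst heq
        rw [pvUpd, pvPg_natCast, if_pos rfl]

theorem bc_table (q : List Char) :
    (∀ z : Int, -1 ≤ bad_char_heuristic q z) ∧
    (∀ x : Nat, x < q.length → (x : Int) ≤ bad_char_heuristic q (pvOrd (chL q x))) := by
  have h : bad_char_heuristic q = ((List.range q.length).map (fun (i : Nat) => (i : Int))).foldl
      (fun bc (i : Int) => pvUpd bc (pvOrd (pvPg q i)) i) (fun _ => -1) := by
    rw [bad_char_heuristic, PySem.List.len_eq, PySem.List.pyRange_zero_natCast]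
  rw [h]
  exact bc_fold q q.length (le_refl _)

-- the pattern matches the text at alignment s (s + m ≤ length is tracked separately)
abbrev matchAt (l q : List Char) (s : Nat) : Prop :=
  ∀ x, x < q.length → chL l (s + x) = chL q x

-- the comparison loop : returns the greatest mismatching index ≤ j0, or -1
theorem bmCmp_spec (l q : List Char) (s : Nat) :
    ∀ (fuel j0 : Nat), j0 < q.length → j0 + 2 ≤ fuel →
    (if ∃ j, j ≤ j0 ∧ chL l (s + j) ≠ chL q j then
      bmCmp l q (s : Int) fuel (j0 : Int) =
        (Nat.findGreatest (fun j => chL l (s + j) ≠ chL q j) j0 : Int) ∧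
        chL l (s + Nat.findGreatest (fun j => chL l (s + j) ≠ chL q j) j0) ≠
          chL q (Nat.findGreatest (fun j => chL l (s + j) ≠ chL q j) j0)
    else bmCmp l q (s : Int) fuel (j0 : Int) = -1) := by
  intro fuel j0
  induction j0 generalizing fuel with
  | zero =>
    intro hj0 hfuel
    obtain ⟨f, rfl⟩ : ∃ f, fuel = f + 2 := ⟨fuel - 2, by omega⟩
    by_cases hc : chL l (s + 0) = chL q 0
    · rw [if_neg (by
        rintro ⟨j, hj1, hj2⟩
        interval_cases j
        exact hj2 hc)]
      rw [bmCmp, if_pos ⟨by simp, by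
        rw [show ((s : Int) + ((0 : Nat) : Int)) = ((s + 0 : Nat) : Int) by push_cast; ring,
          pvPg_natCast, pvPg_natCast]
        exact hc.symm⟩]
      rw [show ((0 : Nat) : Int) - 1 = (-1 : Int) by simp, bmCmp]
      rw [if_neg (by rintro ⟨h1, -⟩; omega)]
    · rw [if_pos ⟨0, le_refl _, hc⟩]
      refine ⟨?_, by simpa [Nat.findGreatest] using hc⟩
      rw [bmCmp, if_neg (by
        rintro ⟨-, he⟩
        apply hc
        rw [show ((s : Int) + ((0 : Nat) : Int)) = ((s + 0 : Nat) : Int) by push_cast; ring,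
          pvPg_natCast, pvPg_natCast] at he
        exact he.symm)]
      simp [Nat.findGreatest]
  | succ j0 ih =>
    intro hj0 hfuel
    obtain ⟨f, rfl⟩ : ∃ f, fuel = f + 1 := ⟨fuel - 1, by omega⟩
    have hrec := ih f (by omega) (by omega)
    by_cases hc : chL l (s + (j0 + 1)) = chL q (j0 + 1)
    · have hstep : bmCmp l q (s : Int) (f + 1) ((j0 + 1 : Nat) : Int) =
          bmCmp l q (s : Int) f ((j0 : Nat) : Int) := by
        rw [bmCmp, if_pos ⟨by positivity, by
          rw [show ((s : Int) + ((j0 + 1 : Nat) : Int)) = ((s + (j0 + 1) : Nat) : Int) by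
            push_cast; ring, pvPg_natCast, pvPg_natCast]
          exact hc.symm⟩]
        rw [show ((j0 + 1 : Nat) : Int) - 1 = ((j0 : Nat) : Int) by push_cast; ring]
      have hiff : (∃ j, j ≤ j0 + 1 ∧ chL l (s + j) ≠ chL q j) ↔
          (∃ j, j ≤ j0 ∧ chL l (s + j) ≠ chL q j) := by
        constructor
        · rintro ⟨j, hj1, hj2⟩
          rcases Nat.lt_succ_iff_lt_or_eq.mp (Nat.lt_succ_of_le hj1) with h | h
          · exact ⟨j, by omega, hj2⟩
          · subst h; exact absurd hc hj2
        · rintro ⟨j, hj1, hj2⟩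
          exact ⟨j, by omega, hj2⟩
      by_cases he : ∃ j, j ≤ j0 + 1 ∧ chL l (s + j) ≠ chL q j
      · rw [if_pos he, hstep, Nat.findGreatest_succ, if_neg (by simpa using hc)]
        rw [if_pos (hiff.mp he)] at hrec
        exact hrec
      · rw [if_neg he, hstep]
        rw [if_neg (fun h => he (hiff.mpr h))] at hrec
        exact hrec
    · rw [if_pos ⟨j0 + 1, le_refl _, hc⟩]
      rw [Nat.findGreatest_succ, if_pos (by simpa using hc)]
      refine ⟨?_, hc⟩
      rw [bmCmp, if_neg (by
        rintro ⟨-, he⟩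
        apply hc
        rw [show ((s : Int) + ((j0 + 1 : Nat) : Int)) = ((s + (j0 + 1) : Nat) : Int) by
          push_cast; ring, pvPg_natCast, pvPg_natCast] at he
        exact he.symm)]

-- occurrences at alignments ≥ s, as the search loop reports them
def occFrom (l q : List Char) (s : Nat) : List Int :=
  ((List.range' s (l.length + 1 - q.length - s)).filter
      (fun u => decide (matchAt l q u))).map (fun (u : Nat) => (u : Int))

theorem occFrom_empty (l q : List Char) (s : Nat) (h : l.length + 1 ≤ q.length + s) :
    occFrom l q s = [] := by
  rw [occFrom]
  have : l.length + 1 - q.length - s = 0 := by omega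
  rw [this]
  rfl

theorem occFrom_step (l q : List Char) (s : Nat) (h : q.length + s ≤ l.length) :
    occFrom l q s =
      (if matchAt l q s then [(s : Int)] else []) ++ occFrom l q (s + 1) := by
  rw [occFrom, occFrom]
  have h1 : l.length + 1 - q.length - s = (l.length + 1 - q.length - (s + 1)) + 1 := by omega
  rw [h1, List.range'_succ, List.filter_cons]
  by_cases hs : matchAt l q s
  · rw [if_pos hs, decide_eq_true hs]; simp
  · rw [if_neg hs, decide_eq_false hs]; simp

theorem occFrom_skip (l q : List Char) (s : Nat) :
    ∀ d : Nat, 1 ≤ d → (∀ u, s < u → u < s + d → ¬ matchAt l q u) →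
    occFrom l q (s + d) = occFrom l q (s + 1) := by
  intro d
  induction d with
  | zero => omega
  | succ d ih =>
    intro _ hno
    rcases Nat.eq_zero_or_pos d with hd | hd
    · subst hd; rfl
    · have hprev : occFrom l q (s + d) = occFrom l q (s + 1) :=
        ih hd (fun u h1 h2 => hno u h1 (by omega))
      by_cases hend : q.length + (s + d) ≤ l.length
      · rw [occFrom_step l q (s + d) hend,
          if_neg (hno (s + d) (by omega) (by omega))] at hprev
        rw [List.nil_append] at hprev
        exact hprev
      · have h1 : occFrom l q (s + (d + 1)) = [] :=
          occFrom_empty l q (s + (d + 1)) (by omega)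
        have h2 : occFrom l q (s + d) = [] := occFrom_empty l q (s + d) (by omega)
        rw [h1, h2.symm.trans hprev]

-- the search loop accumulates exactly the occurrences
theorem bmSearch_spec (l q : List Char) (hm : 1 ≤ q.length) (hn : q.length ≤ l.length) :
    ∀ (fuel s : Nat) (res : List Int), l.length + 2 ≤ fuel + s →
    bmSearch l q (l.length : Int) (q.length : Int)
        (bad_char_heuristic q) (good_suffix_heuristic q) fuel (s : Int) res =
      res ++ occFrom l q s := by
  intro fuel
  induction fuel with
  | zero =>
    intro s res hfuel
    rw [bmSearch, occFrom_empty l q s (by omega), List.append_nil]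
  | succ fuel ih =>
    intro s res hfuel
    by_cases hsK : s ≤ l.length - q.length
    · rw [bmSearch, if_pos (by omega)]
      dsimp only
      rw [Int.toNat_natCast,
        show ((q.length : Int) - 1) = ((q.length - 1 : Nat) : Int) by omega]
      have hcmp := bmCmp_spec l q s (q.length + 1) (q.length - 1) (by omega) (by omega)
      set P := fun j => chL l (s + j) ≠ chL q j with hPdef
      by_cases hex : ∃ j, j ≤ q.length - 1 ∧ chL l (s + j) ≠ chL q j
      · -- a mismatch : shift by the maximum of the two heuristics
        rw [if_pos hex] at hcmp
        obtain ⟨hcmp1, hcmp2⟩ := hcmp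
        set jg := Nat.findGreatest (fun j => chL l (s + j) ≠ chL q j) (q.length - 1) with hjgdef
        have hjglt : jg < q.length := by
          have := Nat.findGreatest_le (P := fun j => chL l (s + j) ≠ chL q j) (q.length - 1)
          omega
        have hpart : ∀ x, jg < x → x < q.length → chL l (s + x) = chL q x := by
          intro x h1 h2
          by_contra hne
          exact (Nat.findGreatest_is_greatest (P := fun j => chL l (s + j) ≠ chL q j)
            h1 (by omega)) hne
        rw [hcmp1, if_neg (by omega)]
        rw [show ((s : Int) + (jg : Int)) = ((s + jg : Nat) : Int) by push_cast; ring,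
          pvPg_natCast,
          show ((jg : Int) + 1) = ((jg + 1 : Nat) : Int) by push_cast; ring,
          gs_table q hm (jg + 1) (by omega)]
        set bcv := bad_char_heuristic q (pvOrd (chL l (s + jg))) with hbcvdef
        set shift := max 1 (max ((jg : Int) - bcv) (gsF q (jg + 1))) with hshiftdef
        have hsh1 : 1 ≤ shift := le_max_left _ _
        obtain ⟨d, hd⟩ : ∃ d : Nat, shift = (d : Int) := ⟨shift.toNat, (Int.toNat_of_nonneg (by omega)).symm⟩
        have hd1 : 1 ≤ d := by omega
        have hnomatch : ∀ u, s < u → u < s + d → ¬ matchAt l q u := by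
          intro u h1 h2 hmu
          set k := u - s with hkdef
          have hk1 : 1 ≤ k := by omega
          have hku : u = s + k := by omega
          have hkd : (k : Int) < shift := by omega
          have hcase : (k : Int) < (jg : Int) - bcv ∨ (k : Int) < gsF q (jg + 1) := by
            rcases max_cases ((jg : Int) - bcv) (gsF q (jg + 1)) with ⟨hmx, -⟩ | ⟨hmx, -⟩ <;>
              rcases max_cases (1 : Int) (max ((jg : Int) - bcv) (gsF q (jg + 1))) with
                ⟨hmx2, -⟩ | ⟨hmx2, -⟩ <;> omega
          rcases hcase with hbc | hgs
          · -- bad character shift was safe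
            have hbcge := (bc_table q).1 (pvOrd (chL l (s + jg)))
            have hkjg : k ≤ jg := by omega
            have hchar : chL q (jg - k) = chL l (s + jg) := by
              have := hmu (jg - k) (by omega)
              rw [hku] at this
              rw [show s + k + (jg - k) = s + jg by omega] at this
              exact this.symm
            have := (bc_table q).2 (jg - k) (by omega)
            rw [hchar] at this
            rw [← hbcvdef] at this
            omega
          · -- good suffix shift was safe
            refine gsF_safe (by omega) hk1 hgs ?_
            rcases Nat.lt_or_ge k (jg + 1) with hkj | hkj
            · left
              refine ⟨hkj, by omega, ⟨by omega, by omega, ?_⟩, ?_⟩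
              · intro t ht
                have e1 : chL q (jg + 1 - k + t) = chL l (u + (jg + 1 - k + t)) :=
                  (hmu (jg + 1 - k + t) (by omega)).symm
                have e2 : chL l (s + (jg + 1 + t)) = chL q (jg + 1 + t) :=
                  hpart (jg + 1 + t) (by omega) (by omega)
                rw [e1, hku, show s + k + (jg + 1 - k + t) = s + (jg + 1 + t) by omega, e2]
              · have e1 : chL q (jg + 1 - k - 1) = chL l (s + jg) := by
                  have := hmu (jg - k) (by omega)
                  rw [hku, show s + k + (jg - k) = s + jg by omega] at this
                  rw [show jg + 1 - k - 1 = jg - k by omega]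
                  exact this.symm
                rw [e1, show jg + 1 - 1 = jg by omega]
                exact hcmp2
            · right
              have hkm : k ≤ q.length := by
                have := gsF_le_len (q := q) hm (x := jg + 1) (by omega)
                omega
              refine ⟨hkj, by omega, hkm, ?_⟩
              intro t ht
              have e1 : chL q (0 + t) = chL l (u + t) := by
                rw [Nat.zero_add]; exact (hmu t (by omega)).symm
              have e2 : chL l (s + (k + t)) = chL q (k + t) :=
                hpart (k + t) (by omega) (by omega)
              rw [e1, hku, show s + k + t = s + (k + t) by omega, e2]
        have hnm : ¬ matchAt l q s := fun hmm => hcmp2 (hmm jg hjglt)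
        rw [show (s : Int) + shift = ((s + d : Nat) : Int) by push_cast; omega]
        rw [ih (s + d) res (by omega)]
        rw [occFrom_step l q s (by omega), if_neg hnm, List.nil_append]
        rcases Nat.eq_or_lt_of_le hd1 with h1 | h1
        · rw [show s + d = s + 1 by omega]
        · rw [occFrom_skip l q s d hd1 hnomatch]
      · -- full match at s
        rw [if_neg hex] at hcmp
        rw [hcmp, if_pos (by norm_num)]
        have hmat : matchAt l q s := by
          intro x hxm
          by_contra hne
          exact hex ⟨x, by omega, hne⟩
        rw [show ((0 : Int)) = (((0 : Nat)) : Int) by simp, gs_table q hm 0 (by omega)]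
        have hpos := gsF_pos (q := q) (x := 0) hm (by omega)
        obtain ⟨d, hd⟩ : ∃ d : Nat, gsF q 0 = (d : Int) :=
          ⟨(gsF q 0).toNat, (Int.toNat_of_nonneg (by omega)).symm⟩
        have hd1 : 1 ≤ d := by omega
        have hnomatch : ∀ u, s < u → u < s + d → ¬ matchAt l q u := by
          intro u h1 h2 hmu
          set k := u - s with hkdef
          have hk1 : 1 ≤ k := by omega
          have hkm : k ≤ q.length := by
            have := gsF_le_len (q := q) hm (x := 0) (by omega)
            omega
          refine gsF_safe (x := 0) (by omega) hk1 (by omega) (Or.inr ⟨by omega, by omega, hkm, ?_⟩)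
          intro t ht
          have e1 : chL q (0 + t) = chL l (u + t) := by
            rw [Nat.zero_add]; exact (hmu t (by omega)).symm
          have e2 : chL l (s + (k + t)) = chL q (k + t) := hmat (k + t) (by omega)
          rw [e1, show u + t = s + (k + t) by omega, e2]
        rw [show (s : Int) + (gsF q 0) = ((s + d : Nat) : Int) by push_cast; omega]
        rw [ih (s + d) (res ++ [(s : Int)]) (by omega)]
        rw [occFrom_step l q s (by omega), if_pos hmat]
        rcases Nat.eq_or_lt_of_le hd1 with h1 | h1
        · rw [show s + d = s + 1 by omega, List.append_assoc]
        · rw [occFrom_skip l q s d hd1 hnomatch, List.append_assoc]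
    · rw [bmSearch, if_neg (by omega), occFrom_empty l q s (by omega), List.append_nil]

theorem chL_eq_getElem {l : List Char} {x : Nat} (h : x < l.length) : chL l x = l[x] := by
  rw [chL, List.getElem?_eq_getElem h, Option.getD_some]

theorem takedrop_eq_iff_matchAt (l q : List Char) (u : Nat) (h : u + q.length ≤ l.length) :
    ((l.drop u).take q.length = q) ↔ matchAt l q u := by
  constructor
  · intro he x hx
    have hx2 : x < ((l.drop u).take q.length).length := by
      simp [List.length_take, List.length_drop]; omega
    have := List.getElem_of_eq he hx2
    rw [List.getElem_take, List.getElem_drop] at this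
    rw [chL_eq_getElem (by omega), chL_eq_getElem hx, this]
  · intro hm2
    apply List.ext_getElem
    · simp [List.length_take, List.length_drop]; omega
    · intro x hx1 hx2
      rw [List.getElem_take, List.getElem_drop]
      have := hm2 x hx2
      rw [chL_eq_getElem (by omega), chL_eq_getElem hx2] at this
      exact this

-- B's filter computes the same occurrence list
theorem alt_eq_occFrom (text pattern : String) (hm : 1 ≤ pattern.toList.length)
    (hn : pattern.toList.length ≤ text.toList.length) :
    boyer_moore_full_alt text pattern = occFrom text.toList pattern.toList 0 := by
  rw [boyer_moore_full_alt, PySem.Str.len_eq, PySem.Str.len_eq]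
  rw [if_neg (by
    intro h
    have : pattern.toList.length = 0 := by exact_mod_cast h
    omega)]
  have hcast : ((text.toList.length : Int) - (pattern.toList.length : Int) + 1) =
      ((text.toList.length - pattern.toList.length + 1 : Nat) : Int) := by
    push_cast [Nat.sub_add_cancel]; omega
  rw [hcast, PySem.List.pyRange_zero_natCast, List.filter_map, occFrom]
  have hr : List.range' 0 (text.toList.length + 1 - pattern.toList.length - 0) =
      List.range (text.toList.length - pattern.toList.length + 1) := by
    rw [List.range_eq_range']
    congr 1
    omega
  rw [hr]
  congr 1
  apply List.filter_congr
  intro u hu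
  have hu2 : u + pattern.toList.length ≤ text.toList.length := by
    have := List.mem_range.mp hu
    omega
  simp only [Function.comp]
  rw [show ((u : Int) + (pattern.toList.length : Int)) =
    (((u + pattern.toList.length : Nat)) : Int) by push_cast; ring]
  rw [show ((u + pattern.toList.length : Nat) : Int) = ((u : Int) + (pattern.toList.length : Int)) by push_cast; ring,
    PySem.List.slice_natCast_add]
  have hbeq : ∀ (a b : List Char), (a == b) = decide (a = b) := by
    intro a b
    cases h : decide (a = b)
    · simp at h; simpa using h
    · simp at h; simp [h]
  rw [hbeq]
  exact decide_eq_decide.mpr (takedrop_eq_iff_matchAt text.toList pattern.toList u hu2)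

-- ===== VERDICT (by name: the statement is the Claim_ definition above) =====
theorem boyer_moore_full_spec : Claim_equal_boyer_moore_full := by
  intro text pattern _
  unfold Spec_boyer_moore_full
  rw [boyer_moore_full]
  rw [PySem.List.len_eq, PySem.List.len_eq]
  by_cases hguard : (pattern.toList.length : Int) = 0 ∨
      (text.toList.length : Int) < (pattern.toList.length : Int)
  · rw [if_pos hguard]
    rw [boyer_moore_full_alt]
    rcases hguard with h0 | hlt
    · rw [if_pos (by rw [PySem.Str.len_eq]; exact h0)]
    · by_cases h0 : pattern.toList.length = 0
      · rw [if_pos (by rw [PySem.Str.len_eq]; exact_mod_cast h0)]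
      · rw [if_neg (by rw [PySem.Str.len_eq]; exact_mod_cast h0)]
        rw [PySem.Str.len_eq, PySem.Str.len_eq]
        rw [show PySem.List.pyRange 0 ((text.toList.length : Int) -
            (pattern.toList.length : Int) + 1) 1 = [] by
          have e1 : text.toList.length = text.length := String.length_toList
          have e2 : pattern.toList.length = pattern.length := String.length_toList
          simp [PySem.List.pyRange]
          omega]
        rfl
  · rw [if_neg hguard]
    rw [not_or, not_lt] at hguard
    have hm : 1 ≤ pattern.toList.length := by
      rcases Nat.eq_zero_or_pos pattern.toList.length with h | h
      · exact absurd (by exact_mod_cast h) hguard.1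
      · omega
    have hn : pattern.toList.length ≤ text.toList.length := by
      have := hguard.2
      omega
    rw [Int.toNat_natCast,
      show ((0 : Int)) = (((0 : Nat)) : Int) by simp,
      bmSearch_spec text.toList pattern.toList hm hn (text.toList.length + 2) 0 [] (by omega),
      List.nil_append, alt_eq_occFrom text pattern hm hn]
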